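-- pv_equiv track=rewrite | github.com/Piyush71rc/resumerelevancecheckerproj | matcher.py | hard_match
-- ===== SOURCE A (Python) =====
-- def hard_match(resume_text, jd_skills):
--     matched_skills = []
--     missing_skills = []
--     resume_text_clean = resume_text.lower()  # lowercase for comparison
--
--     # Flatten jd_skills in case there are nested lists
--     flat_jd_skills = []
--     for skill in jd_skills:
--         if isinstance(skill, list):
--             flat_jd_skills.extend(skill)
--         else:
--             flat_jd_skills.append(skill)
--
--     for skill in flat_jd_skills:
--         if skill.lower() in resume_text_clean:
--             matched_skills.append(skill)
--         else:
--             missing_skills.append(skill)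
--
--     return matched_skills, missing_skills
-- ===== SOURCE B (Python) =====
-- def hard_match(resume_text, jd_skills):
--     # Sliding-window set lookup: group the (lowered) skills by length, then for
--     # each distinct length L slide an L-window over the lowered text and look the
--     # window up in that length's set; finally partition the original skill list
--     # by membership in the found-set.
--     text = resume_text.lower()
--     n = len(text)
--     by_len = {}
--     for s in jd_skills:
--         t = s.lower()
--         by_len.setdefault(len(t), set()).add(t)
--     found = set()
--     for L, group in by_len.items():
--         for i in range(n - L + 1):
--             w = text[i:i + L]
--             if w in group:
--                 found.add(w)
--     matched = [s for s in jd_skills if s.lower() in found]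
--     missing = [s for s in jd_skills if s.lower() not in found]
--     return matched, missing
-- ===== Notes on version B (the rewrite author's own statement) =====
-- stated objective: faster
-- what changed: B groups the lowered skills into sets keyed by length and, for each distinct length L, slides an L-window over the lowered text with a set lookup, instead of A's independent substring search per skill; the original list is then partitioned by membership in the found-set.
import Mathlib
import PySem

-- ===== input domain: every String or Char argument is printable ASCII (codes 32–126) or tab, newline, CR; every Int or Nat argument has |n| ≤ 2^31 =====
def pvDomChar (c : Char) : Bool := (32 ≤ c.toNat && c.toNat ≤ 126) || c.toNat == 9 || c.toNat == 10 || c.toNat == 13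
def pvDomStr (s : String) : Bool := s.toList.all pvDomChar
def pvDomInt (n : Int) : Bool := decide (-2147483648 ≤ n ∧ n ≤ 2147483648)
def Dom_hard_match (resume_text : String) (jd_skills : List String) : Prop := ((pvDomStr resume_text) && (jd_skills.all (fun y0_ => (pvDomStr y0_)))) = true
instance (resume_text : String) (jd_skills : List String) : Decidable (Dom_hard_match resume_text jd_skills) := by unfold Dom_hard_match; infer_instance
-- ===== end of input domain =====

-- B replaces A's per-skill substring searches (one scan of the text per skill) by grouping the lowered
-- skills into sets keyed by length and sliding one window per distinct length over the lowered text
-- with a set lookup; objective: faster (measured).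

-- ===== PORT A =====
def hard_match (resume_text : String) (jd_skills : List String) : List String × List String :=
  let resume_text_clean := PySem.Str.lower resume_text
  -- flatten loop: with jd_skills : List String the isinstance(skill, list) branch is never taken
  let flat_jd_skills := jd_skills.foldl (fun acc skill => acc ++ [skill]) []
  flat_jd_skills.foldl
    (fun (p : List String × List String) skill =>
      if PySem.Str.isIn (PySem.Str.lower skill) resume_text_clean then (p.1 ++ [skill], p.2)
      else (p.1, p.2 ++ [skill]))
    ([], [])

-- ===== PORT B =====
def hard_match_alt (resume_text : String) (jd_skills : List String) : List String × List String :=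
  let text := PySem.Chars.lower resume_text.toList
  let n : Int := (text.length : Int)
  let by_len : PySem.Dict Int (PySem.Set (List Char)) :=
    jd_skills.foldl
      (fun d s =>
        let t := PySem.Chars.lower s.toList
        -- by_len.setdefault(len(t), set()).add(t): add t to the set stored at key len(t)
        d.insert ((t.length : Int)) (PySem.Set.add (d.getD ((t.length : Int)) PySem.Set.empty) t))
      PySem.Dict.empty
  let found : PySem.Set (List Char) :=
    by_len.items.foldl
      (fun (f : PySem.Set (List Char)) p =>
        (PySem.List.pyRange 0 (n - p.1 + 1) 1).foldl
          (fun (f : PySem.Set (List Char)) i =>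
            let w := PySem.List.slice text (some i) (some (i + p.1))   -- text[i:i+L]
            if PySem.Set.contains p.2 w then PySem.Set.add f w else f)
          f)
      PySem.Set.empty
  (jd_skills.filter (fun s => found.contains (PySem.Chars.lower s.toList)),
   jd_skills.filter (fun s => !found.contains (PySem.Chars.lower s.toList)))

-- ===== PRECONDITION & SPEC =====
def Spec_hard_match (resume_text : String) (jd_skills : List String) (out : List String × List String) : Prop := out = hard_match_alt resume_text jd_skills
instance (resume_text : String) (jd_skills : List String) (out : List String × List String) : Decidable (Spec_hard_match resume_text jd_skills out) := by unfold Spec_hard_match; infer_instance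

-- ===== CLAIM (what is proved, stated in full; the proofs are below) =====
def Claim_equal_hard_match : Prop := ∀ (resume_text : String) (jd_skills : List String), Dom_hard_match resume_text jd_skills → Spec_hard_match resume_text jd_skills (hard_match resume_text jd_skills)

-- ===== LEMMAS AND PROOFS =====

-- any slice of the text is an infix of the text
theorem pv_slice_infix (xs : List Char) (a b : Option Int) :
    PySem.List.slice xs a b <:+: xs := by
  simp only [PySem.List.slice]
  exact (List.take_prefix _ _).isInfix.trans (List.drop_suffix _ _).isInfix

-- the window of length |u| at a position where u starts is u itself
theorem pv_slice_eq (xs u : List Char) (j : Nat) (hj : j + u.length ≤ xs.length)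
    (hp : u <+: xs.drop j) :
    PySem.List.slice xs (some (j : Int)) (some ((j : Int) + (u.length : Int))) = u := by
  have hb : ((j : Int) + (u.length : Int)) = ((j + u.length : Nat) : Int) := by push_cast; ring
  simp only [PySem.List.slice, hb, PySem.List.clampIdx_natCast]
  have h1 : min j xs.length = j := by omega
  have h2 : min (j + u.length) xs.length = j + u.length := by omega
  rw [h1, h2]
  have h3 : j + u.length - j = u.length := by omega
  rw [h3]
  exact (List.prefix_iff_eq_take.mp hp).symm

-- a prefix of some drop is a prefix of a drop at an index with index + |u| ≤ length
theorem pv_exists_drop_bounded (text t : List Char) (h : ∃ j, t <+: text.drop j) :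
    ∃ i, i + t.length ≤ text.length ∧ t <+: text.drop i := by
  rcases h with ⟨j, hj⟩
  by_cases hle : j ≤ text.length
  · have := hj.length_le
    simp only [List.length_drop] at this
    exact ⟨j, by omega, hj⟩
  · rw [List.drop_eq_nil_of_le (by omega)] at hj
    have ht : t = [] := List.prefix_nil.mp hj
    exact ⟨text.length, by simp [ht], by simp [ht]⟩

-- the new pair is in the items after an insert
theorem pv_mem_items_insert_self {ν : Type} (d : PySem.Dict Int ν) (k : Int) (v : ν) :
    (k, v) ∈ (d.insert k v).items := by
  rw [PySem.Dict.items_insert]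
  by_cases h : d.contains k = true
  · rcases List.mem_map.mp ((PySem.Dict.contains_iff_mem_keys d k).mp h) with ⟨p, hp, hk⟩
    simp only [h, if_true]
    exact List.mem_map.mpr ⟨p, hp, by simp [hk]⟩
  · simp [h]

-- pairs at other keys survive an insert
theorem pv_mem_items_insert_other {ν : Type} (d : PySem.Dict Int ν) (k L : Int) (v g : ν)
    (hne : L ≠ k) (hg : (L, g) ∈ d.items) : (L, g) ∈ (d.insert k v).items := by
  rw [PySem.Dict.items_insert]
  by_cases h : d.contains k = true
  · simp only [h, if_true]
    refine List.mem_map.mpr ⟨(L, g), hg, ?_⟩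
    simp [hne]
  · simp [h, hg]

-- the by_len fold: every lowered skill ends up in a set stored under its length,
-- and sets already stored persist
theorem pv_dict_mem (skills : List String) (d : PySem.Dict Int (PySem.Set (List Char)))
    (u : List Char) (hnd : d.keys.Nodup)
    (h : (∃ g, ((u.length : Int), g) ∈ d.items ∧ u ∈ g) ∨
         u ∈ skills.map (fun s => PySem.Chars.lower s.toList)) :
    ∃ g, ((u.length : Int), g) ∈
        (skills.foldl
          (fun d s =>
            d.insert (((PySem.Chars.lower s.toList).length : Int))
              (PySem.Set.add (d.getD (((PySem.Chars.lower s.toList).length : Int)) PySem.Set.empty)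
                (PySem.Chars.lower s.toList)))
          d).items ∧ u ∈ g := by
  induction skills generalizing d with
  | nil =>
    rcases h with h | h
    · exact h
    · simp at h
  | cons s rest ih =>
    simp only [List.foldl_cons]
    set t := PySem.Chars.lower s.toList with ht
    set k : Int := ((t.length : Int)) with hk
    set v : PySem.Set (List Char) := PySem.Set.add (d.getD k PySem.Set.empty) t with hv
    have hnd' : (d.insert k v).keys.Nodup := PySem.Dict.nodup_keys_insert d k v hnd
    apply ih (d.insert k v) hnd'
    rcases h with ⟨g, hg, hu⟩ | h
    · by_cases hL : ((u.length : Int)) = k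
      · -- the key being inserted: the stored set is extended, membership persists
        have hg' : (k, g) ∈ d.items := hL ▸ hg
        have hget : d.get? k = some g := PySem.Dict.get?_of_mem_items d hg' hnd
        have hgd : d.getD k PySem.Set.empty = g := by simp [PySem.Dict.getD, hget]
        refine Or.inl ⟨v, by rw [hL]; exact pv_mem_items_insert_self d k v, ?_⟩
        rw [hv, hgd]
        exact (PySem.Set.mem_add _ _ _).mpr (Or.inl hu)
      · exact Or.inl ⟨g, pv_mem_items_insert_other d k _ v g hL hg, hu⟩
    · rcases List.mem_map.mp h with ⟨s', hs', heq⟩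
      rcases List.mem_cons.mp hs' with rfl | hs'
      · -- u is the head skill: it is in the freshly stored set at its own length
        refine Or.inl ⟨v, ?_, ?_⟩
        · have hlen : ((u.length : Int)) = k := by rw [hk, ht, ← heq]
          rw [hlen]
          exact pv_mem_items_insert_self d k v
        · rw [hv]
          exact (PySem.Set.mem_add _ _ _).mpr (Or.inr (by rw [ht, heq]))
      · exact Or.inr (List.mem_map.mpr ⟨s', hs', heq⟩)

-- the inner window loop of B's scan
theorem pv_mem_inner (text : List Char) (L : Int) (g : PySem.Set (List Char))
    (idxs : List Int) (f : PySem.Set (List Char)) (u : List Char) :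
    u ∈ idxs.foldl
        (fun (f : PySem.Set (List Char)) i =>
          if PySem.Set.contains g (PySem.List.slice text (some i) (some (i + L)))
          then PySem.Set.add f (PySem.List.slice text (some i) (some (i + L))) else f) f
      ↔ u ∈ f ∨ ∃ i ∈ idxs,
          PySem.List.slice text (some i) (some (i + L)) = u ∧ PySem.Set.contains g u = true := by
  induction idxs generalizing f with
  | nil => simp
  | cons i rest ih =>
    simp only [List.foldl_cons, ih, List.mem_cons]
    by_cases h : PySem.Set.contains g (PySem.List.slice text (some i) (some (i + L))) = true
    · simp only [h, if_true, PySem.Set.mem_add]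
      constructor
      · rintro ((h1 | rfl) | ⟨j, hj, h2, h3⟩)
        · exact Or.inl h1
        · exact Or.inr ⟨i, Or.inl rfl, rfl, h⟩
        · exact Or.inr ⟨j, Or.inr hj, h2, h3⟩
      · rintro (h1 | ⟨j, (rfl | hj), h2, h3⟩)
        · exact Or.inl (Or.inl h1)
        · exact Or.inl (Or.inr h2.symm)
        · exact Or.inr ⟨j, hj, h2, h3⟩
    · simp only [h]
      constructor
      · rintro (h1 | ⟨j, hj, h2, h3⟩)
        · exact Or.inl h1
        · exact Or.inr ⟨j, Or.inr hj, h2, h3⟩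
      · rintro (h1 | ⟨j, (rfl | hj), h2, h3⟩)
        · exact Or.inl h1
        · exact absurd (h2 ▸ h3) h
        · exact Or.inr ⟨j, hj, h2, h3⟩

-- the outer loop over the length groups
theorem pv_mem_outer (text : List Char) (n : Int)
    (ps : List (Int × PySem.Set (List Char))) (f : PySem.Set (List Char)) (u : List Char) :
    u ∈ ps.foldl
        (fun (f : PySem.Set (List Char)) p =>
          (PySem.List.pyRange 0 (n - p.1 + 1) 1).foldl
            (fun (f : PySem.Set (List Char)) i =>
              if PySem.Set.contains p.2 (PySem.List.slice text (some i) (some (i + p.1)))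
              then PySem.Set.add f (PySem.List.slice text (some i) (some (i + p.1))) else f) f) f
      ↔ u ∈ f ∨ ∃ p ∈ ps, ∃ i ∈ PySem.List.pyRange 0 (n - p.1 + 1) 1,
          PySem.List.slice text (some i) (some (i + p.1)) = u ∧ PySem.Set.contains p.2 u = true := by
  induction ps generalizing f with
  | nil => simp
  | cons p rest ih =>
    simp only [List.foldl_cons, ih, pv_mem_inner, List.mem_cons]
    constructor
    · rintro ((h1 | ⟨i, hi, h2, h3⟩) | ⟨q, hq, i, hi, h2, h3⟩)
      · exact Or.inl h1
      · exact Or.inr ⟨p, Or.inl rfl, i, hi, h2, h3⟩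
      · exact Or.inr ⟨q, Or.inr hq, i, hi, h2, h3⟩
    · rintro (h1 | ⟨q, (rfl | hq), i, hi, h2, h3⟩)
      · exact Or.inl (Or.inl h1)
      · exact Or.inl (Or.inr ⟨i, hi, h2, h3⟩)
      · exact Or.inr ⟨q, hq, i, hi, h2, h3⟩

-- A's accumulator loop is a pair of filters
theorem pv_pairfold (p : String → Prop) [DecidablePred p] (l : List String) (a b : List String) :
    l.foldl (fun (q : List String × List String) s =>
        if p s then (q.1 ++ [s], q.2) else (q.1, q.2 ++ [s])) (a, b)
      = (a ++ l.filter (fun s => decide (p s)), b ++ l.filter (fun s => !decide (p s))) := by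
  induction l generalizing a b with
  | nil => simp
  | cons x rest ih =>
    by_cases h : p x <;> simp [h, ih]

-- a lowered skill is in the found-set iff it occurs in the lowered text
theorem pv_found_iff (resume_text : String) (jd_skills : List String) (s : String)
    (hs : s ∈ jd_skills) :
    (PySem.Set.contains
      ((jd_skills.foldl
          (fun d s' =>
            d.insert (((PySem.Chars.lower s'.toList).length : Int))
              (PySem.Set.add
                (d.getD (((PySem.Chars.lower s'.toList).length : Int)) PySem.Set.empty)
                (PySem.Chars.lower s'.toList)))
          PySem.Dict.empty).items.foldl
        (fun (f : PySem.Set (List Char)) p =>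
          (PySem.List.pyRange 0 (((PySem.Chars.lower resume_text.toList).length : Int) - p.1 + 1) 1).foldl
            (fun (f : PySem.Set (List Char)) i =>
              if PySem.Set.contains p.2
                  (PySem.List.slice (PySem.Chars.lower resume_text.toList) (some i) (some (i + p.1)))
              then PySem.Set.add f
                  (PySem.List.slice (PySem.Chars.lower resume_text.toList) (some i) (some (i + p.1)))
              else f) f)
        PySem.Set.empty)
      (PySem.Chars.lower s.toList))
      = PySem.Chars.isIn (PySem.Chars.lower s.toList) (PySem.Chars.lower resume_text.toList) := by
  set text := PySem.Chars.lower resume_text.toList with htext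
  set u := PySem.Chars.lower s.toList with hu
  rw [Bool.eq_iff_iff, PySem.Set.contains_iff, pv_mem_outer]
  simp only [PySem.Set.empty, List.not_mem_nil, false_or]
  constructor
  · rintro ⟨p, _, i, _, hslice, _⟩
    exact (PySem.Chars.isIn_iff_infix _ _).mpr (hslice ▸ pv_slice_infix text (some i) (some (i + p.1)))
  · intro hIn
    rcases pv_exists_drop_bounded text u
        ((PySem.Chars.exists_prefix_drop_iff_isIn _ _).mpr hIn) with ⟨j, hj, hpre⟩
    rcases pv_dict_mem jd_skills PySem.Dict.empty u PySem.Dict.nodup_keys_empty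
        (Or.inr (List.mem_map.mpr ⟨s, hs, rfl⟩)) with ⟨g, hg, hug⟩
    refine ⟨((u.length : Int), g), hg, (j : Int), ?_, ?_, (PySem.Set.contains_iff _ _).mpr hug⟩
    · rw [PySem.List.mem_pyRange_iff_of_pos (by omega)]
      refine ⟨by omega, ?_, ⟨(j : Int), by ring⟩⟩
      have : (j : Int) + (u.length : Int) ≤ (text.length : Int) := by exact_mod_cast hj
      omega
    · exact pv_slice_eq text u j hj hpre

theorem hard_match_eq (resume_text : String) (jd_skills : List String) :
    hard_match resume_text jd_skills = hard_match_alt resume_text jd_skills := by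
  unfold hard_match hard_match_alt
  have hflat : List.foldl (fun acc skill => acc ++ [skill]) ([] : List String) jd_skills = jd_skills := by
    simpa using PySem.List.foldl_append_singleton_eq_map (fun s => s) jd_skills []
  simp only [hflat,
    pv_pairfold (p := fun skill => PySem.Str.isIn (PySem.Str.lower skill) (PySem.Str.lower resume_text) = true),
    List.nil_append, Prod.mk.injEq]
  constructor <;>
  · apply List.filter_congr
    intro s hs
    rw [pv_found_iff resume_text jd_skills s hs]
    simp [PySem.Str.isIn, PySem.Str.lower]

-- ===== VERDICT (by name: the statement is the Claim_ definition above) =====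
theorem hard_match_spec : Claim_equal_hard_match := by
  intro resume_text jd_skills _
  exact hard_match_eq resume_text jd_skills
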